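-- pv_equiv track=rewrite | github.com/middledoor0421/bird_sahi_temporal | scripts/oracle_analysis.py | neighbor_expand
-- ===== SOURCE A (Python) =====
-- from typing import Any, Dict, List, Optional, Set, Tuple
--
-- def neighbor_expand(
--         selected: Set[int],
--         id_to_rc: Dict[int, Tuple[int, int]],
--         rc_to_id: Dict[Tuple[int, int], int],
--         mode: int = 4,
--         hops: int = 1,
-- ) -> Set[int]:
--     """
--     Expand selected set by grid neighbors.
--
--     mode=4: up/down/left/right
--     mode=8: also diagonal
--     hops: number of BFS steps
--     """
--     if hops <= 0:
--         return set(selected)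
--
--     if mode not in [4, 8]:
--         raise ValueError("mode must be 4 or 8.")
--
--     if mode == 4:
--         dirs = [(-1, 0), (1, 0), (0, -1), (0, 1)]
--     else:
--         dirs = [(-1, 0), (1, 0), (0, -1), (0, 1),
--                 (-1, -1), (-1, 1), (1, -1), (1, 1)]
--
--     out = set(selected)
--     frontier = set(selected)
--
--     for _ in range(hops):
--         new_frontier = set()
--         for tid in frontier:
--             if tid not in id_to_rc:
--                 continue
--             r, c = id_to_rc[tid]
--             for dr, dc in dirs:
--                 rr = r + dr
--                 cc = c + dc
--                 key = (rr, cc)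
--                 if key in rc_to_id:
--                     nid = rc_to_id[key]
--                     if nid not in out:
--                         out.add(nid)
--                         new_frontier.add(nid)
--         frontier = new_frontier
--         if len(frontier) == 0:
--             break
--
--     return out
-- ===== SOURCE B (Python) =====
-- from collections import deque
--
--
-- def neighbor_expand(
--         selected,
--         id_to_rc,
--         rc_to_id,
--         mode=4,
--         hops=1,
-- ):
--     """Expand selected set by grid neighbors (single queue-based BFS with per-node depth)."""
--     if hops <= 0:
--         return set(selected)
--
--     if mode not in [4, 8]:
--         raise ValueError("mode must be 4 or 8.")
--
--     if mode == 4: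
--         dirs = [(-1, 0), (1, 0), (0, -1), (0, 1)]
--     else:
--         dirs = [(-1, 0), (1, 0), (0, -1), (0, 1),
--                 (-1, -1), (-1, 1), (1, -1), (1, 1)]
--
--     visited = set(selected)
--     queue = deque((tid, 0) for tid in visited)
--
--     while queue:
--         tid, depth = queue.popleft()
--         if depth >= hops or tid not in id_to_rc:
--             continue
--         r, c = id_to_rc[tid]
--         for dr, dc in dirs:
--             nid = rc_to_id.get((r + dr, c + dc))
--             if nid is not None and nid not in visited:
--                 visited.add(nid)
--                 queue.append((nid, depth + 1))
--
--     return visited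
-- ===== Notes on version B (the rewrite author's own statement) =====
-- stated objective: alternative
-- what changed: Replaced the level-synchronous BFS (outer 'for _ in range(hops)' loop maintaining per-level frontier sets) with a single FIFO-queue BFS in which each node carries its own depth and is expanded only while depth < hops; the hop loop and the frontier/new_frontier sets disappear.
-- outside the precondition, e.g. on neighbor_expand({1}, {1: (0, 0)}, {(0, 1): 2}, 5, 1): A raises ValueError, B raises ValueError
import Mathlib
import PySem

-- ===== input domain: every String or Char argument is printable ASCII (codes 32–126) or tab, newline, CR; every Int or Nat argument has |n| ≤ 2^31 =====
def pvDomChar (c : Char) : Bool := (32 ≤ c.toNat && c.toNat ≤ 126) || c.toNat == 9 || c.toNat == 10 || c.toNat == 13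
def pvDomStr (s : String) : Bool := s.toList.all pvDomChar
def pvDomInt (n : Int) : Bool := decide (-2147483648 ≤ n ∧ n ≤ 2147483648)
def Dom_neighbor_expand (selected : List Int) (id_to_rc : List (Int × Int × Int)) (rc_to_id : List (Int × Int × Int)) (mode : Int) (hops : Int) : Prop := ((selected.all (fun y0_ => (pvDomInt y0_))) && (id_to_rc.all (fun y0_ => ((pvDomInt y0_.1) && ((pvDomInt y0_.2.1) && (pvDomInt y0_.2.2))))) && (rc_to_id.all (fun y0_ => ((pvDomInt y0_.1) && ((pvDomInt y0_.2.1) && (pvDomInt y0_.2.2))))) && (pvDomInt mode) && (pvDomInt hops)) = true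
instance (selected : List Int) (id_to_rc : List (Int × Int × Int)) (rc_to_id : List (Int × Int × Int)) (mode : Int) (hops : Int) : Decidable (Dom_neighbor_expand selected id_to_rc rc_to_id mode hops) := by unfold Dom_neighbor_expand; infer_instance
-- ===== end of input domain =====

-- B replaces A's level-synchronous BFS (hop-counting loop over per-level frontier sets) by a single
-- FIFO-queue BFS carrying a per-node depth; same return value (a set), objective: alternative decomposition.

-- ===== PORT A =====
-- A-side helpers: the two dicts arrive flattened as association lists (first match wins, keys unique).
def pvDirs4 : List (Int × Int) := [(-1, 0), (1, 0), (0, -1), (0, 1)]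
def pvDirs8 : List (Int × Int) := [(-1, 0), (1, 0), (0, -1), (0, 1), (-1, -1), (-1, 1), (1, -1), (1, 1)]

-- 'tid in id_to_rc' / 'id_to_rc[tid]' on the flattened dict
def pvLookupId (id_to_rc : List (Int × Int × Int)) (tid : Int) : Option (Int × Int) :=
  match id_to_rc with
  | [] => none
  | (k, rc) :: rest => if k = tid then some rc else pvLookupId rest tid

-- '(rr, cc) in rc_to_id' / 'rc_to_id[(rr, cc)]' on the flattened dict
def pvLookupRC (rc_to_id : List (Int × Int × Int)) (r c : Int) : Option Int :=
  match rc_to_id with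
  | [] => none
  | (a, b, v) :: rest => if a = r ∧ b = c then some v else pvLookupRC rest r c

-- A's inner 'for dr, dc in dirs' body; state = (out, new_frontier); the 'nid not in out'
-- guard means the Python set.add appends exactly this way
def pvStepA (rc_to_id : List (Int × Int × Int)) (r c : Int)
    (st : List Int × List Int) (d : Int × Int) : List Int × List Int :=
  match pvLookupRC rc_to_id (r + d.1) (c + d.2) with
  | none => st
  | some nid => if nid ∈ st.1 then st else (st.1 ++ [nid], st.2 ++ [nid])

-- A's body of 'for tid in frontier'
def pvExpandNodeA (id_to_rc rc_to_id : List (Int × Int × Int)) (dirs : List (Int × Int))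
    (st : List Int × List Int) (tid : Int) : List Int × List Int :=
  match pvLookupId id_to_rc tid with
  | none => st
  | some rc => dirs.foldl (pvStepA rc_to_id rc.1 rc.2) st

-- A's 'for _ in range(hops)' loop with the 'if len(frontier) == 0: break'
def pvLoopA (id_to_rc rc_to_id : List (Int × Int × Int)) (dirs : List (Int × Int)) :
    Nat → List Int → List Int → List Int
  | 0, out, _ => out
  | Nat.succ n, out, frontier =>
      if (frontier.foldl (pvExpandNodeA id_to_rc rc_to_id dirs) (out, [])).2 = [] then
        (frontier.foldl (pvExpandNodeA id_to_rc rc_to_id dirs) (out, [])).1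
      else
        pvLoopA id_to_rc rc_to_id dirs n
          (frontier.foldl (pvExpandNodeA id_to_rc rc_to_id dirs) (out, [])).1
          (frontier.foldl (pvExpandNodeA id_to_rc rc_to_id dirs) (out, [])).2

def neighbor_expand (selected : List Int) (id_to_rc : List (Int × Int × Int)) (rc_to_id : List (Int × Int × Int)) (mode : Int) (hops : Int) : List Int :=
  if hops ≤ 0 then PySem.Set.ofList selected
  else
    pvLoopA id_to_rc rc_to_id (if mode = 4 then pvDirs4 else pvDirs8) hops.toNat
      (PySem.Set.ofList selected) (PySem.Set.ofList selected)

-- ===== PORT B =====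
-- B's inner 'for dr, dc in dirs' body; state = (visited, queue); new ids are enqueued at depth dnext
def pvStepB (rc_to_id : List (Int × Int × Int)) (r c dnext : Int)
    (st : List Int × List (Int × Int)) (d : Int × Int) : List Int × List (Int × Int) :=
  match pvLookupRC rc_to_id (r + d.1) (c + d.2) with
  | none => st
  | some nid => if nid ∈ st.1 then st else (st.1 ++ [nid], st.2 ++ [(nid, dnext)])

-- B's 'while queue' loop; the fuel argument only makes the recursion structural
-- (|selected| + |rc_to_id| bounds the number of enqueues, hence of pops)
def pvBfsB (id_to_rc rc_to_id : List (Int × Int × Int)) (dirs : List (Int × Int)) (hops : Int) :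
    Nat → List Int → List (Int × Int) → List Int
  | 0, visited, _ => visited
  | Nat.succ _, visited, [] => visited
  | Nat.succ f, visited, (tid, depth) :: rest =>
      if hops ≤ depth then pvBfsB id_to_rc rc_to_id dirs hops f visited rest
      else
        match pvLookupId id_to_rc tid with
        | none => pvBfsB id_to_rc rc_to_id dirs hops f visited rest
        | some rc =>
            pvBfsB id_to_rc rc_to_id dirs hops f
              (dirs.foldl (pvStepB rc_to_id rc.1 rc.2 (depth + 1)) (visited, rest)).1
              (dirs.foldl (pvStepB rc_to_id rc.1 rc.2 (depth + 1)) (visited, rest)).2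

def neighbor_expand_alt (selected : List Int) (id_to_rc : List (Int × Int × Int)) (rc_to_id : List (Int × Int × Int)) (mode : Int) (hops : Int) : List Int :=
  if hops ≤ 0 then PySem.Set.ofList selected
  else
    pvBfsB id_to_rc rc_to_id (if mode = 4 then pvDirs4 else pvDirs8) hops
      (selected.length + rc_to_id.length)
      (PySem.Set.ofList selected)
      ((PySem.Set.ofList selected).map (fun t => (t, 0)))

-- ===== PRECONDITION & SPEC =====
-- Pre_ excludes only the inputs where A raises ValueError: hops > 0 with a mode other than 4 or 8.
def Pre_neighbor_expand (selected : List Int) (id_to_rc : List (Int × Int × Int)) (rc_to_id : List (Int × Int × Int)) (mode : Int) (hops : Int) : Prop :=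
  hops ≤ 0 ∨ mode = 4 ∨ mode = 8
instance (selected : List Int) (id_to_rc : List (Int × Int × Int)) (rc_to_id : List (Int × Int × Int)) (mode : Int) (hops : Int) : Decidable (Pre_neighbor_expand selected id_to_rc rc_to_id mode hops) := by unfold Pre_neighbor_expand; infer_instance

def pvWitness_neighbor_expand : List Int × (List (Int × Int × Int)) × (List (Int × Int × Int)) × Int × Int :=
  ([1], [(1, 0, 0), (2, 0, 1)], [(0, 1, 2), (1, 0, 7)], 4, 2)

def Spec_neighbor_expand (selected : List Int) (id_to_rc : List (Int × Int × Int)) (rc_to_id : List (Int × Int × Int)) (mode : Int) (hops : Int) (out : List Int) : Prop := out = neighbor_expand_alt selected id_to_rc rc_to_id mode hops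
instance (selected : List Int) (id_to_rc : List (Int × Int × Int)) (rc_to_id : List (Int × Int × Int)) (mode : Int) (hops : Int) (out : List Int) : Decidable (Spec_neighbor_expand selected id_to_rc rc_to_id mode hops out) := by unfold Spec_neighbor_expand; infer_instance

-- ===== CLAIM (what is proved, stated in full; the proofs are below) =====
def Claim_equal_neighbor_expand : Prop := ∀ (selected : List Int) (id_to_rc : List (Int × Int × Int)) (rc_to_id : List (Int × Int × Int)) (mode : Int) (hops : Int), Dom_neighbor_expand selected id_to_rc rc_to_id mode hops → Pre_neighbor_expand selected id_to_rc rc_to_id mode hops → Spec_neighbor_expand selected id_to_rc rc_to_id mode hops (neighbor_expand selected id_to_rc rc_to_id mode hops)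

-- ===== LEMMAS AND PROOFS =====

-- number of rc_to_id values not yet in `out` (an upper bound for future enqueues)
def pvSlack (rc_to_id : List (Int × Int × Int)) (out : List Int) : Nat :=
  ((rc_to_id.map (fun p => p.2.2)).filter (fun v => decide (v ∉ out))).length

lemma pvLookupRC_mem_vals (rc_to_id : List (Int × Int × Int)) (r c v : Int)
    (h : pvLookupRC rc_to_id r c = some v) : v ∈ rc_to_id.map (fun p => p.2.2) := by
  induction rc_to_id with
  | nil => simp [pvLookupRC] at h
  | cons p rest ih =>
      obtain ⟨a, b, w⟩ := p
      rw [pvLookupRC] at h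
      by_cases hab : a = r ∧ b = c
      · rw [if_pos hab] at h; simp at h; simp [h]
      · rw [if_neg hab] at h; simpa using Or.inr (ih h)

lemma pvDirFoldA_acc (rc_to_id : List (Int × Int × Int)) (r c : Int) :
    ∀ (dirs : List (Int × Int)) (st : List Int × List Int),
      dirs.foldl (pvStepA rc_to_id r c) st =
        ((dirs.foldl (pvStepA rc_to_id r c) (st.1, [])).1,
          st.2 ++ (dirs.foldl (pvStepA rc_to_id r c) (st.1, [])).2) := by
  intro dirs
  induction dirs with
  | nil => intro st; simp
  | cons d ds ih =>
      intro st
      simp only [List.foldl_cons]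
      cases h : pvLookupRC rc_to_id (r + d.1) (c + d.2) with
      | none => simp only [pvStepA, h]; exact ih st
      | some nid =>
          by_cases hm : nid ∈ st.1
          · simp only [pvStepA, h, if_pos hm]; exact ih st
          · simp only [pvStepA, h, if_neg hm, List.nil_append]
            rw [ih (st.1 ++ [nid], st.2 ++ [nid]), ih (st.1 ++ [nid], [nid])]
            simp [List.append_assoc]

lemma pvDirFoldA_props (rc_to_id : List (Int × Int × Int)) (r c : Int) :
    ∀ (dirs : List (Int × Int)) (out : List Int),
      (dirs.foldl (pvStepA rc_to_id r c) (out, [])).1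
          = out ++ (dirs.foldl (pvStepA rc_to_id r c) (out, [])).2
        ∧ (dirs.foldl (pvStepA rc_to_id r c) (out, [])).2.Nodup
        ∧ ∀ x ∈ (dirs.foldl (pvStepA rc_to_id r c) (out, [])).2,
            x ∉ out ∧ x ∈ rc_to_id.map (fun p => p.2.2) := by
  intro dirs
  induction dirs with
  | nil => intro out; simp
  | cons d ds ih =>
      intro out
      simp only [List.foldl_cons]
      cases h : pvLookupRC rc_to_id (r + d.1) (c + d.2) with
      | none => simp only [pvStepA, h]; exact ih out
      | some nid =>
          by_cases hm : nid ∈ out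
          · simp only [pvStepA, h, if_pos hm]; exact ih out
          · simp only [pvStepA, h, if_neg hm, List.nil_append]
            rw [pvDirFoldA_acc rc_to_id r c ds (out ++ [nid], [nid])]
            obtain ⟨h1, h2, h3⟩ := ih (out ++ [nid])
            refine ⟨?_, ?_, ?_⟩
            · simp only [h1]; simp [List.append_assoc]
            · simp only [List.nodup_cons, List.singleton_append]
              exact ⟨fun hx => by simpa using (h3 nid hx).1, h2⟩
            · intro x hx
              simp only [List.singleton_append, List.mem_cons] at hx
              rcases hx with rfl | hx
              · exact ⟨hm, pvLookupRC_mem_vals rc_to_id (r + d.1) (c + d.2) x h⟩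
              · obtain ⟨hxo, hxv⟩ := h3 x hx
                exact ⟨fun hc => hxo (by simp [hc]), hxv⟩

lemma pvDirFoldB_eq (rc_to_id : List (Int × Int × Int)) (r c dnext : Int) :
    ∀ (dirs : List (Int × Int)) (out : List Int) (q : List (Int × Int)),
      dirs.foldl (pvStepB rc_to_id r c dnext) (out, q) =
        ((dirs.foldl (pvStepA rc_to_id r c) (out, [])).1,
          q ++ ((dirs.foldl (pvStepA rc_to_id r c) (out, [])).2).map (fun x => (x, dnext))) := by
  intro dirs
  induction dirs with
  | nil => intro out q; simp
  | cons d ds ih =>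
      intro out q
      simp only [List.foldl_cons]
      cases h : pvLookupRC rc_to_id (r + d.1) (c + d.2) with
      | none => simp only [pvStepA, pvStepB, h]; exact ih out q
      | some nid =>
          by_cases hm : nid ∈ out
          · simp only [pvStepA, pvStepB, h, if_pos hm]; exact ih out q
          · simp only [pvStepA, pvStepB, h, if_neg hm, List.nil_append]
            rw [ih (out ++ [nid]) (q ++ [(nid, dnext)]),
              pvDirFoldA_acc rc_to_id r c ds (out ++ [nid], [nid])]
            simp [List.append_assoc]

lemma pvExpandNodeA_acc (id_to_rc rc_to_id : List (Int × Int × Int)) (dirs : List (Int × Int))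
    (st : List Int × List Int) (tid : Int) :
    pvExpandNodeA id_to_rc rc_to_id dirs st tid =
      ((pvExpandNodeA id_to_rc rc_to_id dirs (st.1, []) tid).1,
        st.2 ++ (pvExpandNodeA id_to_rc rc_to_id dirs (st.1, []) tid).2) := by
  cases h : pvLookupId id_to_rc tid with
  | none => simp [pvExpandNodeA, h]
  | some rc => simp only [pvExpandNodeA, h]; exact pvDirFoldA_acc rc_to_id rc.1 rc.2 dirs st

lemma pvExpandNodeA_props (id_to_rc rc_to_id : List (Int × Int × Int)) (dirs : List (Int × Int))
    (out : List Int) (tid : Int) :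
    (pvExpandNodeA id_to_rc rc_to_id dirs (out, []) tid).1
        = out ++ (pvExpandNodeA id_to_rc rc_to_id dirs (out, []) tid).2
      ∧ (pvExpandNodeA id_to_rc rc_to_id dirs (out, []) tid).2.Nodup
      ∧ ∀ x ∈ (pvExpandNodeA id_to_rc rc_to_id dirs (out, []) tid).2,
          x ∉ out ∧ x ∈ rc_to_id.map (fun p => p.2.2) := by
  cases h : pvLookupId id_to_rc tid with
  | none => simp [pvExpandNodeA, h]
  | some rc => simp only [pvExpandNodeA, h]; exact pvDirFoldA_props rc_to_id rc.1 rc.2 dirs out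

lemma pvLevelA_acc (id_to_rc rc_to_id : List (Int × Int × Int)) (dirs : List (Int × Int)) :
    ∀ (frontier : List Int) (st : List Int × List Int),
      frontier.foldl (pvExpandNodeA id_to_rc rc_to_id dirs) st =
        ((frontier.foldl (pvExpandNodeA id_to_rc rc_to_id dirs) (st.1, [])).1,
          st.2 ++ (frontier.foldl (pvExpandNodeA id_to_rc rc_to_id dirs) (st.1, [])).2) := by
  intro frontier
  induction frontier with
  | nil => intro st; simp
  | cons tid fr ih =>
      intro st
      simp only [List.foldl_cons]
      rw [pvExpandNodeA_acc id_to_rc rc_to_id dirs st tid,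
        ih ((pvExpandNodeA id_to_rc rc_to_id dirs (st.1, []) tid).1,
          st.2 ++ (pvExpandNodeA id_to_rc rc_to_id dirs (st.1, []) tid).2),
        ih (pvExpandNodeA id_to_rc rc_to_id dirs (st.1, []) tid)]
      rw [pvExpandNodeA_acc id_to_rc rc_to_id dirs (st.1, []) tid]
      simp [List.append_assoc]

lemma pvLevelA_props (id_to_rc rc_to_id : List (Int × Int × Int)) (dirs : List (Int × Int)) :
    ∀ (frontier : List Int) (out : List Int),
      (frontier.foldl (pvExpandNodeA id_to_rc rc_to_id dirs) (out, [])).1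
          = out ++ (frontier.foldl (pvExpandNodeA id_to_rc rc_to_id dirs) (out, [])).2
        ∧ (frontier.foldl (pvExpandNodeA id_to_rc rc_to_id dirs) (out, [])).2.Nodup
        ∧ ∀ x ∈ (frontier.foldl (pvExpandNodeA id_to_rc rc_to_id dirs) (out, [])).2,
            x ∉ out ∧ x ∈ rc_to_id.map (fun p => p.2.2) := by
  intro frontier
  induction frontier with
  | nil => intro out; simp
  | cons tid fr ih =>
      intro out
      simp only [List.foldl_cons]
      obtain ⟨hn1, hn2, hn3⟩ := pvExpandNodeA_props id_to_rc rc_to_id dirs out tid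
      rcases hN : pvExpandNodeA id_to_rc rc_to_id dirs (out, []) tid with ⟨o1, δ⟩
      rw [hN] at hn1 hn2 hn3
      simp only at hn1 hn2 hn3
      subst hn1
      rw [pvLevelA_acc id_to_rc rc_to_id dirs fr (out ++ δ, δ)]
      obtain ⟨hq1, hq2, hq3⟩ := ih (out ++ δ)
      refine ⟨?_, ?_, ?_⟩
      · simp only [hq1]; simp [List.append_assoc]
      · simp only [List.nodup_append]
        refine ⟨hn2, hq2, ?_⟩
        intro x hx y hy
        rintro rfl
        exact (hq3 x hy).1 (by simp [hx])
      · intro x hx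
        simp only [List.mem_append] at hx
        rcases hx with hx | hx
        · exact hn3 x hx
        · obtain ⟨hxo, hxv⟩ := hq3 x hx
          exact ⟨fun hc => hxo (by simp [hc]), hxv⟩

lemma pvSlack_append (rc_to_id : List (Int × Int × Int)) (out Δ : List Int)
    (hnd : Δ.Nodup) (hmem : ∀ x ∈ Δ, x ∉ out ∧ x ∈ rc_to_id.map (fun p => p.2.2)) :
    pvSlack rc_to_id (out ++ Δ) + Δ.length ≤ pvSlack rc_to_id out := by
  unfold pvSlack
  have hsplit : (rc_to_id.map (fun p => p.2.2)).filter (fun v => decide (v ∉ out ++ Δ)) =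
      ((rc_to_id.map (fun p => p.2.2)).filter (fun v => decide (v ∉ out))).filter
        (fun v => !(decide (v ∈ Δ))) := by
    rw [List.filter_filter]
    apply List.filter_congr
    intro v hv
    by_cases h1 : v ∈ out <;> by_cases h2 : v ∈ Δ <;> simp [h1, h2, List.mem_append]
  rw [hsplit]
  have hpart := (List.length_eq_length_filter_add
    (l := (rc_to_id.map (fun p => p.2.2)).filter (fun v => decide (v ∉ out)))
    (fun v => decide (v ∈ Δ)))
  have hsub : Δ ⊆ ((rc_to_id.map (fun p => p.2.2)).filter (fun v => decide (v ∉ out))).filter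
      (fun v => decide (v ∈ Δ)) := by
    intro x hx
    simp [List.mem_filter, (hmem x hx).2, (hmem x hx).1, hx]
  have hlen := (hnd.subperm hsub).length_le
  omega

lemma pvBfsB_nil (id_to_rc rc_to_id : List (Int × Int × Int)) (dirs : List (Int × Int))
    (hops : Int) (f : Nat) (out : List Int) :
    pvBfsB id_to_rc rc_to_id dirs hops f out [] = out := by
  cases f <;> rfl

lemma pvBfsB_drain (id_to_rc rc_to_id : List (Int × Int × Int)) (dirs : List (Int × Int))
    (hops : Int) :
    ∀ (q : List (Int × Int)) (f : Nat) (out : List Int),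
      (∀ p ∈ q, hops ≤ p.2) → q.length ≤ f →
      pvBfsB id_to_rc rc_to_id dirs hops f out q = out := by
  intro q
  induction q with
  | nil => intro f out _ _; exact pvBfsB_nil _ _ _ _ _ _
  | cons p rest ih =>
      intro f out hall hlen
      obtain ⟨tid, d⟩ := p
      cases f with
      | zero => simp at hlen
      | succ f =>
          simp only [pvBfsB]
          rw [if_pos (hall (tid, d) (by simp))]
          exact ih f out (fun p hp => hall p (List.mem_cons_of_mem _ hp)) (by simpa using Nat.le_of_succ_le_succ (by simpa using hlen))

lemma pvBfsB_level (id_to_rc rc_to_id : List (Int × Int × Int)) (dirs : List (Int × Int))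
    (hops : Int) (d : Int) (hd : d < hops) :
    ∀ (frontier : List Int) (f : Nat) (out acc : List Int),
      pvBfsB id_to_rc rc_to_id dirs hops (frontier.length + f) out
          (frontier.map (fun t => (t, d)) ++ acc.map (fun t => (t, d + 1))) =
        pvBfsB id_to_rc rc_to_id dirs hops f
          (frontier.foldl (pvExpandNodeA id_to_rc rc_to_id dirs) (out, acc)).1
          ((frontier.foldl (pvExpandNodeA id_to_rc rc_to_id dirs) (out, acc)).2.map
            (fun t => (t, d + 1))) := by
  intro frontier
  induction frontier with
  | nil => intro f out acc; simp
  | cons tid rest ih =>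
      intro f out acc
      have hfu : (tid :: rest).length + f = Nat.succ (rest.length + f) := by
        simp [List.length_cons]; omega
      rw [hfu]
      simp only [List.map_cons, List.cons_append, pvBfsB, if_neg (not_le.mpr hd)]
      cases h : pvLookupId id_to_rc tid with
      | none =>
          dsimp only
          have hnode : pvExpandNodeA id_to_rc rc_to_id dirs (out, acc) tid = (out, acc) := by
            simp [pvExpandNodeA, h]
          rw [List.foldl_cons, hnode]
          exact ih f out acc
      | some rc =>
          dsimp only
          rw [pvDirFoldB_eq rc_to_id rc.1 rc.2 (d + 1) dirs out
            (rest.map (fun t => (t, d)) ++ acc.map (fun t => (t, d + 1)))]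
          have hnode : pvExpandNodeA id_to_rc rc_to_id dirs (out, acc) tid =
              ((dirs.foldl (pvStepA rc_to_id rc.1 rc.2) (out, [])).1,
                acc ++ (dirs.foldl (pvStepA rc_to_id rc.1 rc.2) (out, [])).2) := by
            rw [pvExpandNodeA_acc id_to_rc rc_to_id dirs (out, acc) tid]
            simp [pvExpandNodeA, h]
          rw [List.foldl_cons, hnode]
          rw [List.append_assoc, ← List.map_append]
          exact ih f (dirs.foldl (pvStepA rc_to_id rc.1 rc.2) (out, [])).1
            (acc ++ (dirs.foldl (pvStepA rc_to_id rc.1 rc.2) (out, [])).2)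

lemma pvBfsB_fuel (id_to_rc rc_to_id : List (Int × Int × Int)) (dirs : List (Int × Int))
    (hops : Int) :
    ∀ (f g : Nat) (out : List Int) (q : List (Int × Int)),
      q.length + pvSlack rc_to_id out ≤ f → q.length + pvSlack rc_to_id out ≤ g →
      pvBfsB id_to_rc rc_to_id dirs hops f out q = pvBfsB id_to_rc rc_to_id dirs hops g out q := by
  intro f
  induction f with
  | zero =>
      intro g out q hf hg
      have hq : q = [] := List.eq_nil_of_length_eq_zero (by omega)
      subst hq
      rw [pvBfsB_nil, pvBfsB_nil]
  | succ f ih =>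
      intro g out q hf hg
      cases q with
      | nil => rw [pvBfsB_nil, pvBfsB_nil]
      | cons p rest =>
          obtain ⟨tid, d⟩ := p
          simp only [List.length_cons] at hf hg
          cases g with
          | zero => omega
          | succ g =>
              simp only [pvBfsB]
              by_cases hle : hops ≤ d
              · rw [if_pos hle, if_pos hle]
                exact ih g out rest (by omega) (by omega)
              · rw [if_neg hle, if_neg hle]
                cases h : pvLookupId id_to_rc tid with
                | none => dsimp only; exact ih g out rest (by omega) (by omega)
                | some rc =>
                    dsimp only
                    rw [pvDirFoldB_eq rc_to_id rc.1 rc.2 (d + 1) dirs out rest]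
                    obtain ⟨h1, h2, h3⟩ := pvDirFoldA_props rc_to_id rc.1 rc.2 dirs out
                    have hsl := pvSlack_append rc_to_id out
                      (dirs.foldl (pvStepA rc_to_id rc.1 rc.2) (out, [])).2 h2 h3
                    apply ih g
                    · rw [h1]
                      simp only [List.length_append, List.length_map]
                      omega
                    · rw [h1]
                      simp only [List.length_append, List.length_map]
                      omega

lemma pvLoopA_eq (id_to_rc rc_to_id : List (Int × Int × Int)) (dirs : List (Int × Int))
    (hops : Int) :
    ∀ (k : Nat) (d : Int) (out frontier : List Int), d + k = hops →
      pvLoopA id_to_rc rc_to_id dirs k out frontier =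
        pvBfsB id_to_rc rc_to_id dirs hops (frontier.length + pvSlack rc_to_id out) out
          (frontier.map (fun t => (t, d))) := by
  intro k
  induction k with
  | zero =>
      intro d out frontier hdk
      simp only [pvLoopA]
      rw [pvBfsB_drain]
      · intro p hp
        simp only [List.mem_map] at hp
        obtain ⟨t, _, rfl⟩ := hp
        simp only [Nat.cast_zero, add_zero] at hdk
        omega
      · simp [List.length_map]
  | succ k ih =>
      intro d out frontier hdk
      have hd : d < hops := by
        have : ((Nat.succ k : Nat) : Int) = (k : Int) + 1 := by push_cast; ring
        omega
      obtain ⟨h1, h2, h3⟩ := pvLevelA_props id_to_rc rc_to_id dirs frontier out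
      rcases hst : frontier.foldl (pvExpandNodeA id_to_rc rc_to_id dirs) (out, []) with ⟨o1, Δ⟩
      rw [hst] at h1 h2 h3
      simp only at h1 h2 h3
      subst h1
      have hsl := pvSlack_append rc_to_id out Δ h2 h3
      have hlevel := pvBfsB_level id_to_rc rc_to_id dirs hops d hd frontier
        (pvSlack rc_to_id out) out []
      rw [List.map_nil, List.append_nil, hst] at hlevel
      simp only [pvLoopA, hst]
      rw [hlevel]
      rw [pvBfsB_fuel id_to_rc rc_to_id dirs hops (pvSlack rc_to_id out)
        (Δ.length + pvSlack rc_to_id (out ++ Δ)) (out ++ Δ) (Δ.map (fun t => (t, d + 1)))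
        (by simp only [List.length_map]; omega) (by simp only [List.length_map]; omega)]
      by_cases hΔ : Δ = []
      · subst hΔ
        simp [pvBfsB_nil]
      · rw [if_neg hΔ]
        have hdk' : (d + 1) + (k : Int) = hops := by
          have : ((Nat.succ k : Nat) : Int) = (k : Int) + 1 := by push_cast; ring
          omega
        rw [ih (d + 1) (out ++ Δ) Δ hdk']

-- ===== VERDICT (by name: the statement is the Claim_ definition above) =====
theorem neighbor_expand_spec : Claim_equal_neighbor_expand := by
  intro selected id_to_rc rc_to_id mode hops _hdom _hpre
  unfold Spec_neighbor_expand neighbor_expand neighbor_expand_alt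
  by_cases h : hops ≤ 0
  · rw [if_pos h, if_pos h]
  · rw [if_neg h, if_neg h]
    have hcast : ((hops.toNat : Nat) : Int) = hops := Int.toNat_of_nonneg (by omega)
    rw [pvLoopA_eq id_to_rc rc_to_id (if mode = 4 then pvDirs4 else pvDirs8) hops hops.toNat 0
      (PySem.Set.ofList selected) (PySem.Set.ofList selected) (by omega)]
    have hlen : (PySem.Set.ofList selected).length ≤ selected.length :=
      PySem.Set.length_ofList_le selected
    have hslack : pvSlack rc_to_id (PySem.Set.ofList selected) ≤ rc_to_id.length := by
      unfold pvSlack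
      calc ((rc_to_id.map (fun p => p.2.2)).filter
              (fun v => decide (v ∉ PySem.Set.ofList selected))).length
          ≤ (rc_to_id.map (fun p => p.2.2)).length := List.length_filter_le _ _
        _ = rc_to_id.length := by simp
    apply pvBfsB_fuel
    · simp only [List.length_map]
      omega
    · simp only [List.length_map]
      omega
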